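-- pv_equiv track=rewrite | github.com/KyeongGeun/boj | step/divide_and_conquer/6549_히스토그램에서가장큰직사각형.py | mid_area
-- ===== SOURCE A (Python) =====
-- def mid_area(x, y, li):
--     mid = (x+y)//2
--     m = 0
--     height = li[mid]
--     left, right = mid, mid
--
--     while x < left and right < y:
--         if li[left-1] > li[right+1]:
--             left -= 1
--             height = min(height, li[left])
--             m = max(m, height * (right - left + 1) )
--         else:
--             right += 1
--             height = min(height, li[right])
--             m = max(m, height * (right - left + 1) )
--
--     while x < left:
--         left -= 1
--         height = min(height, li[left])
--         m = max(m, height * (right - left + 1) )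
--
--     while right < y:
--         right += 1
--         height = min(height, li[right])
--         m = max(m, height * (right - left + 1) )
--
--     return m
-- ===== SOURCE B (Python) =====
-- def mid_area(x, y, li):
--     # Brute force: take the max of min(li[l..r]) * width over every window
--     # [l, r] with x <= l <= mid <= r <= y of width >= 2, starting from 0.
--     mid = (x + y) // 2
--     best = 0
--     hl = li[mid]
--     l = mid
--     while l >= x:
--         hl = min(hl, li[l])
--         h = hl
--         r = mid
--         while r <= y:
--             h = min(h, li[r])
--             if l != r and h * (r - l + 1) > best:
--                 best = h * (r - l + 1)
--             r += 1
--         l -= 1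
--     return best
-- ===== Notes on version B (the rewrite author's own statement) =====
-- stated objective: simpler
-- what changed: Replaces A's greedy two-pointer expansion (three while-loops choosing which side to grow by comparing neighbours) with a plain brute force: for every crossing window [l, r] with x <= l <= mid <= r <= y of width >= 2, keep a running minimum height and take the maximum of min*width.
import Mathlib
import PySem

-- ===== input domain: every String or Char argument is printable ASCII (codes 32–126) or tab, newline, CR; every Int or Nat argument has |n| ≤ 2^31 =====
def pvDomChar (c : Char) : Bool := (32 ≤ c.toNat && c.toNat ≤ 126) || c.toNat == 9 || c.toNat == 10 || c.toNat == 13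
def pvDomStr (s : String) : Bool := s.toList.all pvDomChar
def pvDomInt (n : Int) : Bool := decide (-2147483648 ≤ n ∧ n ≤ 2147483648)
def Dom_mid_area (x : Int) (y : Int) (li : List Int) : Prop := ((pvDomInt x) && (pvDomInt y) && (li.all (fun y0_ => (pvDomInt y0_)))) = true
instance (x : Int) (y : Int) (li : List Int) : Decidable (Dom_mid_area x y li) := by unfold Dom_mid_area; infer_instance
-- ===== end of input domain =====

-- B replaces A's greedy two-pointer expansion with a brute-force scan of all crossing
-- windows of width >= 2 (simpler, not faster); return-value equivalence only (no mutation).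
-- Loops are ported with a Nat fuel that exactly bounds the remaining iterations (a totality
-- device only: with these fuels each loop runs until its Python condition fails).

-- ===== PORT A =====
-- li[i] with Python index semantics; default 0 is only reached outside Pre_mid_area (where Python raises)
def pget (li : List Int) (i : Int) : Int := (PySem.List.pyGet? li i).getD 0

-- first while loop of A: expand toward the larger neighbour while both sides can grow
def aLoop1 (x : Int) (y : Int) (li : List Int) :
    Nat → Int → Int → Int → Int → Int × Int × Int × Int
  | 0, left, right, height, m => (left, right, height, m)
  | fuel + 1, left, right, height, m =>
    if x < left ∧ right < y then
      if pget li (left - 1) > pget li (right + 1) then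
        let left' := left - 1
        let height' := min height (pget li left')
        aLoop1 x y li fuel left' right height' (max m (height' * (right - left' + 1)))
      else
        let right' := right + 1
        let height' := min height (pget li right')
        aLoop1 x y li fuel left right' height' (max m (height' * (right' - left + 1)))
    else (left, right, height, m)

-- second while loop of A: finish expanding to the left
def aLoop2 (x : Int) (li : List Int) :
    Nat → Int → Int → Int → Int → Int × Int × Int × Int
  | 0, left, right, height, m => (left, right, height, m)
  | fuel + 1, left, right, height, m =>
    if x < left then
      let left' := left - 1
      let height' := min height (pget li left')
      aLoop2 x li fuel left' right height' (max m (height' * (right - left' + 1)))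
    else (left, right, height, m)

-- third while loop of A: finish expanding to the right
def aLoop3 (y : Int) (li : List Int) : Nat → Int → Int → Int → Int → Int
  | 0, _, _, _, m => m
  | fuel + 1, left, right, height, m =>
    if right < y then
      let right' := right + 1
      let height' := min height (pget li right')
      aLoop3 y li fuel left right' height' (max m (height' * (right' - left + 1)))
    else m

def mid_area (x : Int) (y : Int) (li : List Int) : Int :=
  let mid := PySem.Int.floordiv (x + y) 2
  let s1 := aLoop1 x y li ((mid - x) + (y - mid)).toNat mid mid (pget li mid) 0
  let s2 := aLoop2 x li (s1.1 - x).toNat s1.1 s1.2.1 s1.2.2.1 s1.2.2.2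
  aLoop3 y li (y - s2.2.1).toNat s2.1 s2.2.1 s2.2.2.1 s2.2.2.2

-- ===== PORT B =====
-- inner while of Source B: scan r from mid to y keeping the running minimum h
def bInner (y : Int) (li : List Int) : Nat → Int → Int → Int → Int → Int
  | 0, _, _, _, best => best
  | fuel + 1, l, r, h, best =>
    if r ≤ y then
      let h' := min h (pget li r)
      let best' := if l ≠ r ∧ h' * (r - l + 1) > best then h' * (r - l + 1) else best
      bInner y li fuel l (r + 1) h' best'
    else best

-- outer while of Source B: scan l from mid down to x keeping hl = running min of li[l..mid]
def bOuter (x : Int) (y : Int) (mid : Int) (li : List Int) : Nat → Int → Int → Int → Int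
  | 0, _, _, best => best
  | fuel + 1, l, hl, best =>
    if x ≤ l then
      let hl' := min hl (pget li l)
      bOuter x y mid li fuel (l - 1) hl' (bInner y li (y + 1 - mid).toNat l mid hl' best)
    else best

def mid_area_alt (x : Int) (y : Int) (li : List Int) : Int :=
  let mid := PySem.Int.floordiv (x + y) 2
  bOuter x y mid li (mid - x + 1).toNat mid (pget li mid) 0

-- ===== PRECONDITION & SPEC =====
-- Pre_ is exactly the set of inputs where the Python A returns (elsewhere it raises
-- IndexError): for x ≤ y every index of [x, y] is accessed, for y < x only li[mid].
def Pre_mid_area (x : Int) (y : Int) (li : List Int) : Prop :=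
  (x ≤ y ∧ -(li.length : Int) ≤ x ∧ y < (li.length : Int)) ∨
  (y < x ∧ -(li.length : Int) ≤ PySem.Int.floordiv (x + y) 2 ∧
    PySem.Int.floordiv (x + y) 2 < (li.length : Int))
instance (x : Int) (y : Int) (li : List Int) : Decidable (Pre_mid_area x y li) := by
  unfold Pre_mid_area; infer_instance

def pvWitness_mid_area : Int × Int × List Int := (0, 2, [2, 1, 2])

def Spec_mid_area (x : Int) (y : Int) (li : List Int) (out : Int) : Prop := out = mid_area_alt x y li
instance (x : Int) (y : Int) (li : List Int) (out : Int) : Decidable (Spec_mid_area x y li out) := by unfold Spec_mid_area; infer_instance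

-- ===== CLAIM (what is proved, stated in full; the proofs are below) =====
def Claim_equal_mid_area : Prop := ∀ (x : Int) (y : Int) (li : List Int), Dom_mid_area x y li → Pre_mid_area x y li → Spec_mid_area x y li (mid_area x y li)

-- ===== LEMMAS AND PROOFS =====

-- minimum of li[l..r] (via pget), the common yardstick for both ports
def minseg (li : List Int) (l r : Int) : Int :=
  if l < r then min (pget li l) (minseg li (l + 1) r) else pget li l
termination_by (r - l).toNat
decreasing_by omega

def wval (li : List Int) (l r : Int) : Int := minseg li l r * (r - l + 1)

theorem minseg_self (li : List Int) {l r : Int} (h : ¬ l < r) : minseg li l r = pget li l := by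
  rw [minseg, if_neg h]

theorem minseg_cons (li : List Int) {l r : Int} (h : l < r) :
    minseg li l r = min (pget li l) (minseg li (l + 1) r) := by
  rw [minseg, if_pos h]

theorem minseg_extl (li : List Int) {l r : Int} (h : l ≤ r) :
    minseg li (l - 1) r = min (pget li (l - 1)) (minseg li l r) := by
  rw [minseg_cons li (by omega : l - 1 < r)]
  norm_num

theorem minseg_extr (li : List Int) {l r : Int} (h : l ≤ r) :
    minseg li l (r + 1) = min (minseg li l r) (pget li (r + 1)) := by
  by_cases hlr : l < r
  · rw [minseg_cons li (by omega : l < r + 1), minseg_cons li hlr,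
      minseg_extr li (by omega : l + 1 ≤ r), min_assoc]
  · have hl : l = r := by omega
    subst hl
    rw [minseg_cons li (by omega : l < l + 1), minseg_self li (by omega : ¬ l < l),
      minseg_self li (by omega : ¬ l + 1 < l + 1)]
termination_by (r - l).toNat
decreasing_by omega

theorem minseg_le (li : List Int) {l r i : Int} (h1 : l ≤ i) (h2 : i ≤ r) :
    minseg li l r ≤ pget li i := by
  by_cases hlr : l < r
  · rw [minseg_cons li hlr]
    by_cases hi : l = i
    · subst hi; exact min_le_left _ _
    · exact le_trans (min_le_right _ _) (minseg_le li (by omega) h2)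
  · have : l = i := by omega
    subst this
    rw [minseg_self li hlr]
termination_by (r - l).toNat
decreasing_by omega

theorem minseg_mono_left (li : List Int) {l l' r : Int} (h1 : l ≤ l') (h2 : l' ≤ r) :
    minseg li l r ≤ minseg li l' r := by
  by_cases h : l = l'
  · subst h; exact le_refl _
  · calc minseg li l r ≤ minseg li (l + 1) r := by
          rw [minseg_cons li (by omega : l < r)]; exact min_le_right _ _
      _ ≤ minseg li l' r := minseg_mono_left li (by omega) h2
termination_by (l' - l).toNat
decreasing_by omega

theorem minseg_mono_right (li : List Int) {l r' r : Int} (h1 : l ≤ r') (h2 : r' ≤ r) :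
    minseg li l r ≤ minseg li l r' := by
  by_cases h : r' = r
  · subst h; exact le_refl _
  · calc minseg li l r = min (minseg li l (r - 1)) (pget li r) := by
          have := minseg_extr li (show l ≤ r - 1 by omega) (r := r - 1)
          simpa using this
      _ ≤ minseg li l (r - 1) := min_le_left _ _
      _ ≤ minseg li l r' := minseg_mono_right li h1 (by omega)
termination_by (r - r').toNat
decreasing_by omega

-- the loop invariant of A's greedy expansion
def GInv (x y mid : Int) (li : List Int) (L R h m : Int) : Prop :=
  x ≤ L ∧ L ≤ mid ∧ mid ≤ R ∧ R ≤ y ∧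
  h = minseg li L R ∧
  (∀ l r, x ≤ l → l ≤ mid → mid ≤ r → r ≤ y → r - l = R - L → minseg li l r ≤ h) ∧
  0 ≤ m ∧
  (∀ l r, x ≤ l → l ≤ mid → mid ≤ r → r ≤ y → ¬(l = mid ∧ r = mid) → r - l ≤ R - L →
    wval li l r ≤ m) ∧
  (m = 0 ∨ ∃ l r, (x ≤ l ∧ l ≤ mid ∧ mid ≤ r ∧ r ≤ y ∧ ¬(l = mid ∧ r = mid)) ∧ m = wval li l r)

theorem step_left {x y mid L R h m : Int} {li : List Int}
    (inv : GInv x y mid li L R h m) (hx : x < L)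
    (hc : R = y ∨ pget li (R + 1) ≤ pget li (L - 1)) :
    GInv x y mid li (L - 1) R (min h (pget li (L - 1)))
      (max m (min h (pget li (L - 1)) * (R - (L - 1) + 1))) := by
  obtain ⟨hxL, hLm, hmR, hRy, hh, hw, hm0, hb, hd⟩ := inv
  -- every crossing window one wider than [L,R] has min ≤ the new height
  have key : ∀ l r, x ≤ l → l ≤ mid → mid ≤ r → r ≤ y → r - l = R - L + 1 →
      minseg li l r ≤ min h (pget li (L - 1)) := by
    intro l r h1 h2 h3 h4 h5
    refine le_min ?_ ?_
    · by_cases hr : mid < r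
      · exact le_trans (minseg_mono_right li (by omega) (by omega))
          (hw l (r - 1) h1 h2 (by omega) (by omega) (by omega))
      · exact le_trans (minseg_mono_left li (by omega : l ≤ l + 1) (by omega))
          (hw (l + 1) r (by omega) (by omega) h3 h4 (by omega))
    · by_cases hl : l ≤ L - 1
      · exact minseg_le li hl (by omega)
      · -- then R + 1 ≤ r, so the window contains li[R+1] ≤ li[L-1]
        rcases hc with hc | hc
        · omega
        · exact le_trans (minseg_le li (by omega : l ≤ R + 1) (by omega)) hc
  refine ⟨by omega, by omega, hmR, hRy, ?_, ?_, ?_, ?_, ?_⟩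
  · rw [minseg_extl li (show L ≤ R by omega), hh, min_comm]
  · intro l r h1 h2 h3 h4 h5
    exact key l r h1 h2 h3 h4 (by omega)
  · exact le_trans hm0 (le_max_left _ _)
  · intro l r h1 h2 h3 h4 h5 h6
    by_cases hcase : r - l ≤ R - L
    · exact le_trans (hb l r h1 h2 h3 h4 h5 hcase) (le_max_left _ _)
    · have hmin : minseg li l r ≤ min h (pget li (L - 1)) :=
        key l r h1 h2 h3 h4 (by omega)
      have hwidth : r - l + 1 = R - (L - 1) + 1 := by omega
      calc wval li l r = minseg li l r * (r - l + 1) := rfl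
        _ ≤ min h (pget li (L - 1)) * (r - l + 1) :=
            mul_le_mul_of_nonneg_right hmin (by omega)
        _ = min h (pget li (L - 1)) * (R - (L - 1) + 1) := by rw [hwidth]
        _ ≤ _ := le_max_right _ _
  · by_cases hcase : min h (pget li (L - 1)) * (R - (L - 1) + 1) ≤ m
    · rw [max_eq_left hcase]; exact hd
    · rw [max_eq_right (by omega)]
      refine Or.inr ⟨L - 1, R, ⟨by omega, by omega, hmR, hRy, by omega⟩, ?_⟩
      have : minseg li (L - 1) R = min h (pget li (L - 1)) := by
        rw [minseg_extl li (show L ≤ R by omega), hh, min_comm]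
      rw [wval, this]

theorem step_right {x y mid L R h m : Int} {li : List Int}
    (inv : GInv x y mid li L R h m) (hy : R < y)
    (hc : L = x ∨ pget li (L - 1) ≤ pget li (R + 1)) :
    GInv x y mid li L (R + 1) (min h (pget li (R + 1)))
      (max m (min h (pget li (R + 1)) * (R + 1 - L + 1))) := by
  obtain ⟨hxL, hLm, hmR, hRy, hh, hw, hm0, hb, hd⟩ := inv
  have key : ∀ l r, x ≤ l → l ≤ mid → mid ≤ r → r ≤ y → r - l = R - L + 1 →
      minseg li l r ≤ min h (pget li (R + 1)) := by
    intro l r h1 h2 h3 h4 h5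
    refine le_min ?_ ?_
    · by_cases hr : mid < r
      · exact le_trans (minseg_mono_right li (by omega) (by omega))
          (hw l (r - 1) h1 h2 (by omega) (by omega) (by omega))
      · exact le_trans (minseg_mono_left li (by omega : l ≤ l + 1) (by omega))
          (hw (l + 1) r (by omega) (by omega) h3 h4 (by omega))
    · by_cases hr : R + 1 ≤ r
      · exact minseg_le li (by omega : l ≤ R + 1) hr
      · rcases hc with hc | hc
        · omega
        · exact le_trans (minseg_le li (by omega : l ≤ L - 1) (by omega)) hc
  refine ⟨hxL, hLm, by omega, by omega, ?_, ?_, ?_, ?_, ?_⟩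
  · rw [minseg_extr li (show L ≤ R by omega), hh]
  · intro l r h1 h2 h3 h4 h5
    exact key l r h1 h2 h3 h4 (by omega)
  · exact le_trans hm0 (le_max_left _ _)
  · intro l r h1 h2 h3 h4 h5 h6
    by_cases hcase : r - l ≤ R - L
    · exact le_trans (hb l r h1 h2 h3 h4 h5 hcase) (le_max_left _ _)
    · have hmin : minseg li l r ≤ min h (pget li (R + 1)) :=
        key l r h1 h2 h3 h4 (by omega)
      have hwidth : r - l + 1 = R + 1 - L + 1 := by omega
      calc wval li l r = minseg li l r * (r - l + 1) := rfl
        _ ≤ min h (pget li (R + 1)) * (r - l + 1) :=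
            mul_le_mul_of_nonneg_right hmin (by omega)
        _ = min h (pget li (R + 1)) * (R + 1 - L + 1) := by rw [hwidth]
        _ ≤ _ := le_max_right _ _
  · by_cases hcase : min h (pget li (R + 1)) * (R + 1 - L + 1) ≤ m
    · rw [max_eq_left hcase]; exact hd
    · rw [max_eq_right (by omega)]
      refine Or.inr ⟨L, R + 1, ⟨hxL, hLm, by omega, by omega, by omega⟩, ?_⟩
      have : minseg li L (R + 1) = min h (pget li (R + 1)) := by
        rw [minseg_extr li (show L ≤ R by omega), hh]
      rw [wval, this]

theorem aLoop1_inv {x y mid : Int} {li : List Int} :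
    ∀ (fuel : Nat) {L R h m : Int},
    ((L - x) + (y - R)).toNat ≤ fuel → GInv x y mid li L R h m →
    GInv x y mid li (aLoop1 x y li fuel L R h m).1 (aLoop1 x y li fuel L R h m).2.1
      (aLoop1 x y li fuel L R h m).2.2.1 (aLoop1 x y li fuel L R h m).2.2.2 ∧
    ((aLoop1 x y li fuel L R h m).1 = x ∨ (aLoop1 x y li fuel L R h m).2.1 = y) := by
  intro fuel
  induction fuel with
  | zero =>
    intro L R h m hf inv
    refine ⟨inv, ?_⟩
    obtain ⟨h1, _, _, h4, _⟩ := inv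
    dsimp only [aLoop1]
    omega
  | succ f ih =>
    intro L R h m hf inv
    rw [aLoop1]
    by_cases hcond : x < L ∧ R < y
    · rw [if_pos hcond]
      by_cases hgt : pget li (L - 1) > pget li (R + 1)
      · rw [if_pos hgt]
        exact ih (by omega) (step_left inv hcond.1 (Or.inr (le_of_lt hgt)))
      · rw [if_neg hgt]
        exact ih (by omega) (step_right inv hcond.2 (Or.inr (by omega)))
    · rw [if_neg hcond]
      exact ⟨inv, by obtain ⟨h1, _, _, h4, _⟩ := inv; dsimp only; omega⟩

theorem aLoop2_inv {x y mid : Int} {li : List Int} :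
    ∀ (fuel : Nat) {L R h m : Int},
    (L - x).toNat ≤ fuel → GInv x y mid li L R h m → R = y →
    GInv x y mid li (aLoop2 x li fuel L R h m).1 (aLoop2 x li fuel L R h m).2.1
      (aLoop2 x li fuel L R h m).2.2.1 (aLoop2 x li fuel L R h m).2.2.2 ∧
    (aLoop2 x li fuel L R h m).1 = x ∧ (aLoop2 x li fuel L R h m).2.1 = y := by
  intro fuel
  induction fuel with
  | zero =>
    intro L R h m hf inv hR
    refine ⟨inv, ?_, hR⟩
    obtain ⟨h1, _⟩ := inv
    dsimp only [aLoop2]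
    omega
  | succ f ih =>
    intro L R h m hf inv hR
    rw [aLoop2]
    by_cases hcond : x < L
    · rw [if_pos hcond]
      exact ih (by omega) (step_left inv hcond (Or.inl hR)) hR
    · rw [if_neg hcond]
      exact ⟨inv, by obtain ⟨h1, _⟩ := inv; dsimp only; omega, hR⟩

theorem aLoop3_inv {x y mid : Int} {li : List Int} :
    ∀ (fuel : Nat) {L R h m : Int},
    (y - R).toNat ≤ fuel → GInv x y mid li L R h m → L = x →
    ∃ h', GInv x y mid li x y h' (aLoop3 y li fuel L R h m) := by
  intro fuel
  induction fuel with
  | zero =>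
    intro L R h m hf inv hL
    obtain ⟨h1, h2, h3, h4, rest⟩ := inv
    have hR : R = y := by omega
    subst hR; subst hL
    exact ⟨h, h1, h2, h3, h4, rest⟩
  | succ f ih =>
    intro L R h m hf inv hL
    rw [aLoop3]
    by_cases hcond : R < y
    · rw [if_pos hcond]
      exact ih (by omega) (step_right inv hcond (Or.inl hL)) hL
    · rw [if_neg hcond]
      obtain ⟨h1, h2, h3, h4, rest⟩ := inv
      have hR : R = y := by omega
      subst hR; subst hL
      exact ⟨h, h1, h2, h3, h4, rest⟩

-- after loop1 one edge is reached; loop2 then pins the left edge, loop3 the right edge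
theorem tail_facts {x y mid : Int} {li : List Int} {L R h m : Int}
    (inv : GInv x y mid li L R h m) (hedge : L = x ∨ R = y) :
    ∃ h', GInv x y mid li x y h'
      (aLoop3 y li (y - (aLoop2 x li (L - x).toNat L R h m).2.1).toNat
        (aLoop2 x li (L - x).toNat L R h m).1 (aLoop2 x li (L - x).toNat L R h m).2.1
        (aLoop2 x li (L - x).toNat L R h m).2.2.1 (aLoop2 x li (L - x).toNat L R h m).2.2.2) := by
  have h2 : (GInv x y mid li (aLoop2 x li (L - x).toNat L R h m).1
      (aLoop2 x li (L - x).toNat L R h m).2.1 (aLoop2 x li (L - x).toNat L R h m).2.2.1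
      (aLoop2 x li (L - x).toNat L R h m).2.2.2) ∧ (aLoop2 x li (L - x).toNat L R h m).1 = x := by
    rcases hedge with hx0 | hy0
    · have hz : (L - x).toNat = 0 := by
        obtain ⟨h1, _⟩ := inv; omega
      rw [hz]
      exact ⟨inv, hx0⟩
    · obtain ⟨a, b, _⟩ := aLoop2_inv _ (le_refl _) inv hy0
      exact ⟨a, b⟩
  exact aLoop3_inv _ (le_refl _) h2.1 h2.2

-- A's result satisfies the full invariant on the whole window [x, y]
theorem A_facts {x y : Int} {li : List Int} (hxy : x ≤ y) :
    ∃ h', GInv x y (PySem.Int.floordiv (x + y) 2) li x y h' (mid_area x y li) := by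
  have hmid := PySem.Int.floordiv_two_mid_bounds hxy
  simp only [mid_area]
  set mid := PySem.Int.floordiv (x + y) 2 with hmiddef
  have init : GInv x y mid li mid mid (pget li mid) 0 := by
    refine ⟨hmid.1, le_refl _, le_refl _, hmid.2,
      (minseg_self li (by omega)).symm, ?_, le_refl _, ?_, Or.inl rfl⟩
    · intro l r h1 h2 h3 h4 h5
      have he : l = mid ∧ r = mid := by omega
      rw [he.1, he.2, minseg_self li (by omega)]
    · intro l r h1 h2 h3 h4 h5 h6
      exact absurd (by omega : l = mid ∧ r = mid) h5
  obtain ⟨inv1, hedge⟩ := aLoop1_inv _ (le_refl _) init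
  exact tail_facts inv1 hedge

-- B side: the inner scan dominates every window [l, r'] with r ≤ r' ≤ y
theorem bInner_spec {y l : Int} {li : List Int} :
    ∀ (fuel : Nat) {r h best : Int},
    (y + 1 - r).toNat ≤ fuel → l ≤ r → min h (pget li r) = minseg li l r →
    best ≤ bInner y li fuel l r h best ∧
    (∀ r', r ≤ r' → r' ≤ y → l ≠ r' → wval li l r' ≤ bInner y li fuel l r h best) ∧
    (bInner y li fuel l r h best = best ∨
      ∃ r', r ≤ r' ∧ r' ≤ y ∧ l ≠ r' ∧ bInner y li fuel l r h best = wval li l r') := by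
  intro fuel
  induction fuel with
  | zero =>
    intro r h best hf hlr hh
    exact ⟨le_refl _, fun r' h1 h2 _ => absurd (by omega : False) id, Or.inl rfl⟩
  | succ f ih =>
    intro r h best hf hlr hh
    rw [bInner]
    by_cases hr : r ≤ y
    · rw [if_pos hr]
      have hnext : min (min h (pget li r)) (pget li (r + 1)) = minseg li l (r + 1) := by
        rw [minseg_extr li hlr, hh]
      obtain ⟨ih1, ih2, ih3⟩ :=
        ih (best := if l ≠ r ∧ min h (pget li r) * (r - l + 1) > best
                    then min h (pget li r) * (r - l + 1) else best)
          (by omega) (by omega : l ≤ r + 1) hnext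
      have hbb : best ≤ (if l ≠ r ∧ min h (pget li r) * (r - l + 1) > best
                   then min h (pget li r) * (r - l + 1) else best) := by
        split_ifs with hfir
        · exact le_of_lt hfir.2
        · exact le_refl _
      refine ⟨le_trans hbb ih1, ?_, ?_⟩
      · intro r' h1 h2 h3
        by_cases hre : r' = r
        · subst hre
          have hv : wval li l r' = min h (pget li r') * (r' - l + 1) := by
            rw [wval, ← hh]
          refine le_trans ?_ ih1
          rw [hv]
          split_ifs with hfir
          · exact le_refl _
          · exact le_of_not_gt (fun hgt => hfir ⟨h3, hgt⟩)
        · exact ih2 r' (by omega) h2 h3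
      · rcases ih3 with heq | ⟨r', hr1, hr2, hr3, hr4⟩
        · rw [heq]
          split_ifs with hfir
          · exact Or.inr ⟨r, le_refl _, hr, hfir.1, by rw [wval, ← hh]⟩
          · exact Or.inl rfl
        · exact Or.inr ⟨r', by omega, hr2, hr3, hr4⟩
    · rw [if_neg hr]
      exact ⟨le_refl _, fun r' h1 h2 _ => absurd (by omega : r ≤ y) hr, Or.inl rfl⟩

-- B side: the outer scan dominates every crossing window with l' ≤ l
theorem bOuter_spec {x y mid : Int} {li : List Int} :
    ∀ (fuel : Nat) {l hl best : Int},
    (l - x + 1).toNat ≤ fuel → l ≤ mid → min hl (pget li l) = minseg li l mid →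
    best ≤ bOuter x y mid li fuel l hl best ∧
    (∀ l' r', x ≤ l' → l' ≤ l → mid ≤ r' → r' ≤ y → ¬(l' = mid ∧ r' = mid) →
      wval li l' r' ≤ bOuter x y mid li fuel l hl best) ∧
    (bOuter x y mid li fuel l hl best = best ∨
      ∃ l' r', (x ≤ l' ∧ l' ≤ mid ∧ mid ≤ r' ∧ r' ≤ y ∧ ¬(l' = mid ∧ r' = mid)) ∧
        bOuter x y mid li fuel l hl best = wval li l' r') := by
  intro fuel
  induction fuel with
  | zero =>
    intro l hl best hf hlm hhl
    exact ⟨le_refl _, fun l' r' h1 h2 _ _ _ => absurd (by omega : False) id, Or.inl rfl⟩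
  | succ f ih =>
    intro l hl best hf hlm hhl
    rw [bOuter]
    by_cases hx : x ≤ l
    · rw [if_pos hx]
      have hinnerh : min (min hl (pget li l)) (pget li mid) = minseg li l mid := by
        rw [hhl]
        exact min_eq_left (minseg_le li hlm (le_refl _))
      have hf' : (l - 1 - x + 1).toNat ≤ f := by omega
      obtain ⟨in1, in2, in3⟩ :=
        bInner_spec (y := y) (best := best) _ (le_refl _) hlm hinnerh
      have hnexthl : min (min hl (pget li l)) (pget li (l - 1)) = minseg li (l - 1) mid := by
        rw [minseg_extl li hlm, hhl, min_comm]
      obtain ⟨ih1, ih2, ih3⟩ :=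
        ih (best := bInner y li (y + 1 - mid).toNat l mid (min hl (pget li l)) best)
          hf' (by omega : l - 1 ≤ mid) hnexthl
      refine ⟨le_trans in1 ih1, ?_, ?_⟩
      · intro l' r' h1 h2 h3 h4 h5
        by_cases hle : l' = l
        · subst hle
          have hne : l' ≠ r' := by
            intro he
            exact h5 ⟨by omega, by omega⟩
          exact le_trans (in2 r' h3 h4 hne) ih1
        · exact ih2 l' r' h1 (by omega) h3 h4 h5
      · rcases ih3 with heq | hw
        · rw [heq]
          rcases in3 with heq2 | ⟨r', hr1, hr2, hr3, hr4⟩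
          · exact Or.inl heq2
          · refine Or.inr ⟨l, r', ⟨hx, hlm, by omega, hr2, ?_⟩, hr4⟩
            intro he
            exact hr3 (by omega)
        · exact Or.inr hw
    · rw [if_neg hx]
      exact ⟨le_refl _, fun l' r' h1 h2 _ _ _ => absurd (by omega : x ≤ l) hx, Or.inl rfl⟩

theorem B_facts {x y : Int} {li : List Int} (hxy : x ≤ y) :
    0 ≤ mid_area_alt x y li ∧
    (∀ l r, x ≤ l → l ≤ PySem.Int.floordiv (x + y) 2 →
      PySem.Int.floordiv (x + y) 2 ≤ r → r ≤ y →
      ¬(l = PySem.Int.floordiv (x + y) 2 ∧ r = PySem.Int.floordiv (x + y) 2) →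
      wval li l r ≤ mid_area_alt x y li) ∧
    (mid_area_alt x y li = 0 ∨
      ∃ l r, (x ≤ l ∧ l ≤ PySem.Int.floordiv (x + y) 2 ∧
        PySem.Int.floordiv (x + y) 2 ≤ r ∧ r ≤ y ∧
        ¬(l = PySem.Int.floordiv (x + y) 2 ∧ r = PySem.Int.floordiv (x + y) 2)) ∧
        mid_area_alt x y li = wval li l r) := by
  have hmid := PySem.Int.floordiv_two_mid_bounds hxy
  simp only [mid_area_alt]
  set mid := PySem.Int.floordiv (x + y) 2 with hmiddef
  have hstart : min (pget li mid) (pget li mid) = minseg li mid mid := by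
    rw [min_self, minseg_self li (by omega)]
  obtain ⟨o1, o2, o3⟩ :=
    bOuter_spec (y := y) (best := 0) _ (le_refl _) (le_refl mid) hstart
  exact ⟨o1, fun l r h1 h2 h3 h4 h5 => o2 l r h1 h2 h3 h4 h5, o3⟩

-- degenerate window y < x: every loop fuel is 0 and both programs return 0
theorem degenerate_eq {x y : Int} {li : List Int} (hyx : y < x) :
    mid_area x y li = 0 ∧ mid_area_alt x y li = 0 := by
  have hmid := PySem.Int.floordiv_two_mid_bounds (le_of_lt hyx) (lo := y) (hi := x)
  rw [Int.add_comm y x] at hmid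
  have hlt : PySem.Int.floordiv (x + y) 2 < x := by
    rw [PySem.Int.floordiv_lt_iff_lt_mul (by omega : (0:Int) < 2)]
    omega
  constructor
  · simp only [mid_area]
    rw [show ((PySem.Int.floordiv (x + y) 2 - x) + (y - PySem.Int.floordiv (x + y) 2)).toNat
        = 0 by omega]
    dsimp only [aLoop1]
    rw [show (PySem.Int.floordiv (x + y) 2 - x).toNat = 0 by omega]
    dsimp only [aLoop2]
    rw [show (y - PySem.Int.floordiv (x + y) 2).toNat = 0 by omega]
    dsimp only [aLoop3]
  · simp only [mid_area_alt]
    rw [show (PySem.Int.floordiv (x + y) 2 - x + 1).toNat = 0 by omega]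
    dsimp only [bOuter]

-- ===== VERDICT (by name: the statement is the Claim_ definition above) =====
theorem mid_area_spec : Claim_equal_mid_area := by
  intro x y li _ _
  unfold Spec_mid_area
  by_cases hxy : x ≤ y
  · obtain ⟨h', invA⟩ := A_facts (li := li) hxy
    obtain ⟨hB0, hB2, hB3⟩ := B_facts (li := li) hxy
    obtain ⟨hxL, hLm, hmR, hRy, hh, hw, hm0, hb, hd⟩ := invA
    refine le_antisymm ?_ ?_
    · rcases hd with h0 | ⟨l, r, ⟨b1, b2, b3, b4, b5⟩, heq⟩
      · rw [h0]; exact hB0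
      · rw [heq]; exact hB2 l r b1 b2 b3 b4 b5
    · rcases hB3 with h0 | ⟨l, r, ⟨b1, b2, b3, b4, b5⟩, heq⟩
      · rw [h0]; exact hm0
      · rw [heq]; exact hb l r b1 b2 b3 b4 b5 (by omega)
  · obtain ⟨ha, hbz⟩ := degenerate_eq (li := li) (by omega : y < x)
    rw [ha, hbz]
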